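-- pv_equiv track=rewrite | github.com/keyshark5294/Russian-school | EGE/olimpiada/olimpiada2/file1.py | is_unique_digits_in_base12
-- ===== SOURCE A (Python) =====
-- def is_unique_digits_in_base12(number):
--     """Проверяет, что в числе в двенадцатеричной системе счисления все цифры уникальны."""
--     digits = set()
--     while number > 0:
--         digit = number % 12
--         if digit in digits:
--             return False
--         digits.add(digit)
--         number //= 12
--     return True
-- ===== SOURCE B (Python) =====
-- def is_unique_digits_in_base12(number):
--     """Проверяет, что в числе в двенадцатеричной системе счисления все цифры уникальны."""
--     digits = []
--     while number > 0:
--         digits.append(number % 12)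
--         number //= 12
--     return len(digits) == len(set(digits))
-- ===== Notes on version B (the rewrite author's own statement) =====
-- stated objective: simpler
-- what changed: B materializes all base-12 digits into a list with no per-digit membership test or early return, then decides uniqueness once by comparing len(digits) with len(set(digits)).
import Mathlib
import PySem

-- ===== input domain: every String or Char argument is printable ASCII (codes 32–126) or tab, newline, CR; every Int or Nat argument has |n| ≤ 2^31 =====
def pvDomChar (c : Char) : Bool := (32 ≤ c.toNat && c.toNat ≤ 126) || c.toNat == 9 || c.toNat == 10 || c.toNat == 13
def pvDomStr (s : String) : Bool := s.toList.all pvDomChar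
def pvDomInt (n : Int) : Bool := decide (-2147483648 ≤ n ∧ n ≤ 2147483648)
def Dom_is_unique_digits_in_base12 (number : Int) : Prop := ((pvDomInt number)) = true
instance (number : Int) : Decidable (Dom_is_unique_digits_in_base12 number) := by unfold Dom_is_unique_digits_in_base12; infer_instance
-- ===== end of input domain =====

-- B replaces A's in-loop set-membership check and early return by collecting all
-- base-12 digits in a list and comparing len(digits) with len(set(digits)) once (simpler).

-- termination measure for both loops: number //= 12 strictly decreases toNat while number > 0
theorem pvFloordiv12_toNat_lt (n : Int) (h : 0 < n) :
    (PySem.Int.floordiv n 12).toNat < n.toNat := by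
  rw [PySem.Int.floordiv_eq_ediv_of_pos (by norm_num)]
  omega

-- ===== PORT A =====
def pvLoopA (number : Int) (digits : PySem.Set Int) : Bool :=
  if h : number > 0 then
    let digit := PySem.Int.mod number 12
    if PySem.Set.contains digits digit then false
    else pvLoopA (PySem.Int.floordiv number 12) (PySem.Set.add digits digit)
  else true
termination_by number.toNat
decreasing_by exact pvFloordiv12_toNat_lt number h

def is_unique_digits_in_base12 (number : Int) : Bool :=
  pvLoopA number PySem.Set.empty

-- ===== PORT B =====
-- the while loop of B: collect the base-12 digits in order
def pvDigitsB (number : Int) : List Int :=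
  if h : number > 0 then
    PySem.Int.mod number 12 :: pvDigitsB (PySem.Int.floordiv number 12)
  else []
termination_by number.toNat
decreasing_by exact pvFloordiv12_toNat_lt number h

def is_unique_digits_in_base12_alt (number : Int) : Bool :=
  let digits := pvDigitsB number
  digits.length == (PySem.Set.ofList digits).length

-- ===== PRECONDITION & SPEC =====
def Spec_is_unique_digits_in_base12 (number : Int) (out : Bool) : Prop := out = is_unique_digits_in_base12_alt number
instance (number : Int) (out : Bool) : Decidable (Spec_is_unique_digits_in_base12 number out) := by unfold Spec_is_unique_digits_in_base12; infer_instance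

-- ===== CLAIM (what is proved, stated in full; the proofs are below) =====
def Claim_equal_is_unique_digits_in_base12 : Prop := ∀ (number : Int), Dom_is_unique_digits_in_base12 number → Spec_is_unique_digits_in_base12 number (is_unique_digits_in_base12 number)

-- ===== LEMMAS AND PROOFS =====

-- A's loop succeeds iff the digit list is duplicate-free and disjoint from the accumulated set
theorem pvLoopA_eq_true_iff (number : Int) : ∀ (s : PySem.Set Int),
    pvLoopA number s = true ↔
      (pvDigitsB number).Nodup ∧ ∀ d ∈ pvDigitsB number, d ∉ s := by
  induction number using pvDigitsB.induct with
  | case1 n h ih =>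
    intro s
    rw [pvLoopA, pvDigitsB]
    simp only [h, dif_pos]
    by_cases hc : PySem.Set.contains s (PySem.Int.mod n 12) = true
    · rw [if_pos hc]
      have hm : PySem.Int.mod n 12 ∈ s := (PySem.Set.contains_iff s _).mp hc
      simp only [Bool.false_eq_true, false_iff]
      rintro ⟨-, h2⟩
      exact h2 _ (List.mem_cons_self) hm
    · rw [if_neg hc]
      have hcm : PySem.Int.mod n 12 ∉ s := fun hm => hc ((PySem.Set.contains_iff s _).mpr hm)
      rw [ih (PySem.Set.add s (PySem.Int.mod n 12))]
      constructor
      · rintro ⟨h1, h2⟩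
        have hdx : PySem.Int.mod n 12 ∉ pvDigitsB (PySem.Int.floordiv n 12) := by
          intro hmem
          exact h2 _ hmem ((PySem.Set.mem_add s _ _).mpr (Or.inr rfl))
        refine ⟨List.nodup_cons.mpr ⟨hdx, h1⟩, ?_⟩
        intro d hd
        rcases List.mem_cons.mp hd with rfl | hd
        · exact hcm
        · intro hds
          exact h2 d hd ((PySem.Set.mem_add s _ _).mpr (Or.inl hds))
      · rintro ⟨h1, h2⟩
        rcases List.nodup_cons.mp h1 with ⟨hdx, h1'⟩
        refine ⟨h1', ?_⟩
        intro d hd hds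
        rcases (PySem.Set.mem_add s _ _).mp hds with hds' | rfl
        · exact h2 d (List.mem_cons_of_mem _ hd) hds'
        · exact hdx hd
  | case2 n h =>
    intro s
    rw [pvLoopA, pvDigitsB]
    simp [h]

-- |set(xs)| = |xs| exactly when xs has no duplicates
theorem pvOfList_length_eq_iff (xs : List Int) :
    (PySem.Set.ofList xs).length = xs.length ↔ xs.Nodup := by
  have hperm : (PySem.Set.ofList xs).Perm xs.dedup :=
    (List.perm_ext_iff_of_nodup (PySem.Set.nodup_ofList xs) (List.nodup_dedup xs)).mpr
      (fun a => by rw [PySem.Set.mem_ofList, List.mem_dedup])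
  rw [hperm.length_eq]
  constructor
  · intro h
    rw [← List.dedup_eq_self]
    exact (List.dedup_sublist xs).eq_of_length h
  · intro h
    rw [List.dedup_eq_self.mpr h]
-- ===== VERDICT (by name: the statement is the Claim_ definition above) =====
theorem is_unique_digits_in_base12_spec : Claim_equal_is_unique_digits_in_base12 := by
  intro number _
  unfold Spec_is_unique_digits_in_base12 is_unique_digits_in_base12 is_unique_digits_in_base12_alt
  rw [Bool.eq_iff_iff]
  simp only [beq_iff_eq]
  rw [pvLoopA_eq_true_iff]
  constructor
  · rintro ⟨h1, _⟩; exact ((pvOfList_length_eq_iff _).mpr h1).symm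
  · intro h
    refine ⟨(pvOfList_length_eq_iff _).mp h.symm, ?_⟩
    intro d _ hd
    simp [PySem.Set.empty] at hd
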